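-- pv_equiv track=rewrite | github.com/Wintergrasped/TSN_V2 | V1_Archive/callsign_extractor.py | rejoin_potential_callsigns
-- ===== SOURCE A (Python) =====
-- def rejoin_potential_callsigns(corrected_text):
--     words = corrected_text.split()
--     rejoined = []
--     buffer = []
--
--     def flush_buffer():
--         if buffer:
--             rejoined.append(''.join(buffer))
--             buffer.clear()
--
--     for word in words:
--         if len(word) == 1 or (len(word) == 2 and word.isdigit()):
--             buffer.append(word)
--         else:
--             flush_buffer()
--             rejoined.append(word)
--     flush_buffer()
--
--     return ' '.join(rejoined)
-- ===== SOURCE B (Python) =====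
-- def rejoin_potential_callsigns(corrected_text):
--     def is_short(w):
--         return len(w) == 1 or (len(w) == 2 and w.isdigit())
--
--     words = corrected_text.split()
--     out = []
--     i = 0
--     n = len(words)
--     while i < n:
--         if is_short(words[i]):
--             j = i
--             while j < n and is_short(words[j]):
--                 j += 1
--             out.append(''.join(words[i:j]))
--             i = j
--         else:
--             out.append(words[i])
--             i += 1
--     return ' '.join(out)
-- ===== Notes on version B (the rewrite author's own statement) =====
-- stated objective: alternative
-- what changed: Replaces A's buffer-and-flush accumulator loop with index-based scanning that locates each maximal run of short tokens up front and joins the whole run at once, removing the mutable buffer and flush helper entirely.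
import Mathlib
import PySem

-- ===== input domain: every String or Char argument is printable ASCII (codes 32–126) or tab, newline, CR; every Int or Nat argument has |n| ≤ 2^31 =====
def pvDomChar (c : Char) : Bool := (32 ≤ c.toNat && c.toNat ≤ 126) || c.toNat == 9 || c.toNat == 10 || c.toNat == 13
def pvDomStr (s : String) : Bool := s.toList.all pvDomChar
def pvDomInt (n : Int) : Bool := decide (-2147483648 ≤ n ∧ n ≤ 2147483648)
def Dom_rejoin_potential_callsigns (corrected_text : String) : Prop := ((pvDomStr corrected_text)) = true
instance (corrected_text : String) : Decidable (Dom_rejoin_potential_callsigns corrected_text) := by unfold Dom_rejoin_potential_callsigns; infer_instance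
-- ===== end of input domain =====

-- B replaces A's buffer-and-flush accumulator with a run-at-a-time scan that joins each
-- maximal run of short tokens in one step (objective: alternative decomposition, same cost).

-- ===== PORT A =====
-- len(word) == 1 or (len(word) == 2 and word.isdigit())
def pvIsShortA (w : String) : Bool :=
  PySem.Str.len w == 1 || (PySem.Str.len w == 2 && PySem.Str.strIsdigit w)

-- flush_buffer applied to current (rejoined, buffer)
def pvFlushA (rej buf : List String) : List String :=
  if buf = [] then rej else rej ++ [PySem.Str.join "" buf]

-- one iteration of A's for-loop over state (rejoined, buffer)
def pvStepA (st : List String × List String) (w : String) : List String × List String :=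
  if pvIsShortA w then (st.1, st.2 ++ [w])
  else (pvFlushA st.1 st.2 ++ [w], [])

def rejoin_potential_callsigns (corrected_text : String) : String :=
  let words := PySem.Str.split₀ corrected_text
  let st := words.foldl pvStepA ([], [])
  PySem.Str.join " " (pvFlushA st.1 st.2)

-- ===== PORT B =====
def pvIsShortB (w : String) : Bool :=
  PySem.Str.len w == 1 || (PySem.Str.len w == 2 && PySem.Str.strIsdigit w)

-- B's outer while-loop: at a short token, the inner while-scan finds the end of the
-- maximal run (takeWhile/dropWhile = the j-scan and the words[i:j] slice) and the run
-- is joined in one step; a non-short token is emitted as is.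
def pvRunsB : List String → List String
  | [] => []
  | w :: ws =>
    if pvIsShortB w then
      PySem.Str.join "" (w :: ws.takeWhile pvIsShortB) :: pvRunsB (ws.dropWhile pvIsShortB)
    else
      w :: pvRunsB ws
termination_by l => l.length
decreasing_by
  · simpa using Nat.lt_succ_of_le (List.length_dropWhile_le _ _)
  · simp

def rejoin_potential_callsigns_alt (corrected_text : String) : String :=
  PySem.Str.join " " (pvRunsB (PySem.Str.split₀ corrected_text))

-- ===== PRECONDITION & SPEC =====
def Spec_rejoin_potential_callsigns (corrected_text : String) (out : String) : Prop := out = rejoin_potential_callsigns_alt corrected_text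
instance (corrected_text : String) (out : String) : Decidable (Spec_rejoin_potential_callsigns corrected_text out) := by unfold Spec_rejoin_potential_callsigns; infer_instance

-- ===== CLAIM (what is proved, stated in full; the proofs are below) =====
def Claim_equal_rejoin_potential_callsigns : Prop := ∀ (corrected_text : String), Dom_rejoin_potential_callsigns corrected_text → Spec_rejoin_potential_callsigns corrected_text (rejoin_potential_callsigns corrected_text)

-- ===== LEMMAS AND PROOFS =====

theorem pvIsShort_eq (w : String) : pvIsShortA w = pvIsShortB w := rfl

theorem pvFlushA_split (rej buf : List String) :
    pvFlushA rej buf = rej ++ pvFlushA [] buf := by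
  unfold pvFlushA; split_ifs <;> simp

-- the list A's loop produces after processing ws starting from buffer buf, with rejoined factored out
def pvG (buf : List String) : List String → List String
  | [] => pvFlushA [] buf
  | w :: ws =>
    if pvIsShortA w then pvG (buf ++ [w]) ws
    else pvFlushA [] buf ++ w :: pvG [] ws

theorem foldl_eq_pvG (ws : List String) : ∀ rej buf,
    (let st := ws.foldl pvStepA (rej, buf); pvFlushA st.1 st.2) = rej ++ pvG buf ws := by
  induction ws with
  | nil => intro rej buf; simpa [pvG] using pvFlushA_split rej buf
  | cons w ws ih =>
    intro rej buf
    simp only [List.foldl_cons, pvStepA, pvG]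
    by_cases h : pvIsShortA w = true
    · simp only [h, if_true]; exact ih rej (buf ++ [w])
    · simp only [h, if_false, Bool.false_eq_true]
      rw [ih]
      rw [pvFlushA_split rej buf]
      simp

theorem pvG_nonempty (ws : List String) : ∀ buf, buf ≠ [] →
    pvG buf ws = PySem.Str.join "" (buf ++ ws.takeWhile pvIsShortA) :: pvG [] (ws.dropWhile pvIsShortA) := by
  induction ws with
  | nil => intro buf hb; simp [pvG, pvFlushA, hb]
  | cons w ws ih =>
    intro buf hb
    by_cases h : pvIsShortA w = true
    · simp only [pvG, h, if_true, List.takeWhile_cons, List.dropWhile_cons]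
      rw [ih (buf ++ [w]) (by simp)]
      simp
    · simp only [pvG, h, if_false, Bool.false_eq_true, List.takeWhile_cons, List.dropWhile_cons,
        pvFlushA, hb]
      simp

theorem pvG_nil_eq_runs (n : Nat) : ∀ ws : List String, ws.length ≤ n → pvG [] ws = pvRunsB ws := by
  induction n with
  | zero => intro ws h; simp at h; simp [h, pvG, pvRunsB, pvFlushA]
  | succ n ih =>
    intro ws h
    match ws with
    | [] => simp [pvG, pvRunsB, pvFlushA]
    | w :: ws =>
      simp only [pvG, pvRunsB, ← pvIsShort_eq]
      by_cases hw : pvIsShortA w = true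
      · simp only [hw, if_true, List.nil_append]
        rw [pvG_nonempty ws [w] (by simp)]
        rw [ih (ws.dropWhile pvIsShortA)
          (le_trans (List.length_dropWhile_le _ _) (by simpa using h))]
        exact rfl
      · rw [ih ws (by simpa using h)]
        simp [hw, pvFlushA]

-- ===== VERDICT (by name: the statement is the Claim_ definition above) =====
theorem rejoin_potential_callsigns_spec : Claim_equal_rejoin_potential_callsigns := by
  intro s _
  unfold Spec_rejoin_potential_callsigns rejoin_potential_callsigns rejoin_potential_callsigns_alt
  simp only []
  rw [foldl_eq_pvG (PySem.Str.split₀ s) [] [], pvG_nil_eq_runs (PySem.Str.split₀ s).length _ le_rfl]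
  simp
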